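-- pv_equiv track=rewrite | github.com/al-osokin/rueo_global | backend/app/parsing/parser_v3/text_parser.py | _parse_italic_only
-- ===== SOURCE A (Python) =====
-- from typing import Any, Dict, List, Optional, Tuple
--
-- def _parse_italic_only(text: str, italic_open: bool = False) -> List[Dict[str, Any]]:
--     """Парсинг только курсива, без разделителей (для preserve_punctuation=True)."""
--     content: List[Dict[str, Any]] = []
--
--     # Особый случай: весь текст обрамлён в "_"
--     if text.startswith('_') and text.endswith('_') and len(text) > 2:
--         italic_text = text[1:-1]
--         content.append({
--             'type': 'text',
--             'style': 'italic',
--             'text': italic_text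
--         })
--         return content
--
--     # Обычный случай: переключение курсива на "_"
--     i = 0
--     current_text = ""
--     italic = italic_open
--
--     while i < len(text):
--         char = text[i]
--
--         if char == '_' and (i == 0 or text[i-1] != '\\'):
--             if current_text:
--                 content.append({
--                     'type': 'text',
--                     'style': 'italic' if italic else 'regular',
--                     'text': current_text
--                 })
--                 current_text = ""
--             italic = not italic
--         else:
--             current_text += char
--
--         i += 1
--
--     if current_text:
--         content.append({
--             'type': 'text',
--             'style': 'italic' if italic else 'regular',
--             'text': current_text
--         })
--
--     return content
-- ===== SOURCE B (Python) =====
-- from typing import Any, Dict, List, Optional, Tuple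
--
-- def _parse_italic_only(text: str, italic_open: bool = False) -> List[Dict[str, Any]]:
--     # Special case: whole text wrapped in "_"
--     if text.startswith('_') and text.endswith('_') and len(text) > 2:
--         return [{'type': 'text', 'style': 'italic', 'text': text[1:-1]}]
--     # General case: split at unescaped underscores, then style pieces by parity.
--     pieces = []
--     buf = ''
--     for i, ch in enumerate(text):
--         if ch == '_' and (i == 0 or text[i - 1] != '\\'):
--             pieces.append(buf)
--             buf = ''
--         else:
--             buf += ch
--     pieces.append(buf)
--     return [{'type': 'text',
--              'style': ('italic' if (italic_open != (k % 2 == 1)) else 'regular'),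
--              'text': p}
--             for k, p in enumerate(pieces) if p]
-- ===== Notes on version B (the rewrite author's own statement) =====
-- stated objective: alternative
-- what changed: Replaces A's single-pass per-character state machine (toggling an italic flag and flushing a buffer into the result as it goes) by a two-phase decomposition: split the text at unescaped underscores into pieces, then map the non-empty pieces to segments with a style computed from piece-index parity and italic_open.
import Mathlib
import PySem

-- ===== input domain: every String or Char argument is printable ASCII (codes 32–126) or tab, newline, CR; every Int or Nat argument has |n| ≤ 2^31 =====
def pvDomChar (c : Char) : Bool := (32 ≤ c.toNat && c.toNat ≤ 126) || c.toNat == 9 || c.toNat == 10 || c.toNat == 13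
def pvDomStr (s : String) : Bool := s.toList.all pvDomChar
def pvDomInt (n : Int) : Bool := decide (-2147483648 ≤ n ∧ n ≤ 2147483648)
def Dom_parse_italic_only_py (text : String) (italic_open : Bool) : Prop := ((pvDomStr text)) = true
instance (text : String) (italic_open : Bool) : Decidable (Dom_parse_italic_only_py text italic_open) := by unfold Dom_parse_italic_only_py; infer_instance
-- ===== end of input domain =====

-- B replaces A's per-character italic-toggling state machine by a split-at-unescaped-underscores
-- pass followed by a parity-styled map over the pieces (objective: alternative decomposition).

-- a segment dict {'type':'text','style':style,'text':txt} as an association list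
def pvMkSeg (style : String) (txt : List Char) : List (String × String) :=
  [("type", "text"), ("style", style), ("text", String.ofList txt)]

-- ===== PORT A =====
-- the while-loop of A: chars left, previous char (none at i = 0), accumulated content,
-- current_text and the italic flag
def pvALoop (chars : List Char) (prev : Option Char) (content : List (List (String × String)))
    (cur : List Char) (italic : Bool) : List (List (String × String)) :=
  match chars with
  | [] => if cur = [] then content
          else content ++ [pvMkSeg (if italic then "italic" else "regular") cur]
  | c :: rest =>
    if c = '_' ∧ prev ≠ some '\\' then
      pvALoop rest (some c)
        (if cur = [] then content
         else content ++ [pvMkSeg (if italic then "italic" else "regular") cur]) [] (!italic)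
    else
      pvALoop rest (some c) content (cur ++ [c]) italic

def parse_italic_only_py (text : String) (italic_open : Bool) : List (List (String × String)) :=
  -- text.startswith('_') and text.endswith('_') and len(text) > 2; text[1:-1]
  if text.toList.head? = some '_' ∧ text.toList.getLast? = some '_' ∧ 2 < text.toList.length then
    [pvMkSeg "italic" ((text.toList.drop 1).dropLast)]
  else
    pvALoop text.toList none [] [] italic_open

-- ===== PORT B =====
-- Source B's split loop: break the text at unescaped underscores (buf = current piece)
def pvSplitUnesc (chars : List Char) (prev : Option Char) (buf : List Char) : List (List Char) :=
  match chars with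
  | [] => [buf]
  | c :: rest =>
    if c = '_' ∧ prev ≠ some '\\' then buf :: pvSplitUnesc rest (some c) []
    else pvSplitUnesc rest (some c) (buf ++ [c])

-- 'italic' if (italic_open != (k % 2 == 1)) else 'regular'   (Int % with divisor 2 equals Python's %)
def pvStyleB (italic_open : Bool) (k : Int) : String :=
  if italic_open ≠ decide (k % 2 = 1) then "italic" else "regular"

def parse_italic_only_py_alt (text : String) (italic_open : Bool) : List (List (String × String)) :=
  if text.toList.head? = some '_' ∧ text.toList.getLast? = some '_' ∧ 2 < text.toList.length then
    [pvMkSeg "italic" ((text.toList.drop 1).dropLast)]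
  else
    -- [seg for k, p in enumerate(pieces) if p]
    (PySem.List.enumerate (pvSplitUnesc text.toList none []) 0).filterMap
      (fun kp => if kp.2 = [] then none else some (pvMkSeg (pvStyleB italic_open kp.1) kp.2))

-- ===== PRECONDITION & SPEC =====
def Spec_parse_italic_only_py (text : String) (italic_open : Bool) (out : List (List (String × String))) : Prop := out = parse_italic_only_py_alt text italic_open
instance (text : String) (italic_open : Bool) (out : List (List (String × String))) : Decidable (Spec_parse_italic_only_py text italic_open out) := by unfold Spec_parse_italic_only_py; infer_instance

-- ===== CLAIM (what is proved, stated in full; the proofs are below) =====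
def Claim_equal_parse_italic_only_py : Prop := ∀ (text : String) (italic_open : Bool), Dom_parse_italic_only_py text italic_open → Spec_parse_italic_only_py text italic_open (parse_italic_only_py text italic_open)

-- ===== LEMMAS AND PROOFS =====

-- render the split pieces with alternating style, dropping empty pieces
def pvRender (pieces : List (List Char)) (it : Bool) : List (List (String × String)) :=
  match pieces with
  | [] => []
  | p :: ps =>
    (if p = [] then [] else [pvMkSeg (if it then "italic" else "regular") p]) ++ pvRender ps (!it)

-- A's loop is: emitted content so far ++ the rendering of the remaining split pieces
theorem pvALoop_eq_render (chars : List Char) :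
    ∀ (prev : Option Char) (content : List (List (String × String))) (cur : List Char)
      (it : Bool),
      pvALoop chars prev content cur it = content ++ pvRender (pvSplitUnesc chars prev cur) it := by
  induction chars with
  | nil =>
    intro prev content cur it
    simp only [pvALoop, pvSplitUnesc, pvRender]
    split_ifs with h <;> simp
  | cons c rest ih =>
    intro prev content cur it
    simp only [pvALoop, pvSplitUnesc]
    by_cases h : c = '_' ∧ prev ≠ some '\\'
    · rw [if_pos h, if_pos h, ih]
      by_cases h2 : cur = [] <;> simp [h2, pvRender, List.append_assoc]
    · rw [if_neg h, if_neg h]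
      exact ih _ _ _ _

-- B's parity-styled map over enumerated pieces equals alternating rendering
theorem pvFilterMap_eq_render (pieces : List (List Char)) :
    ∀ (io : Bool) (n : Int),
      (PySem.List.enumerate pieces n).filterMap
        (fun kp => if kp.2 = [] then none else some (pvMkSeg (pvStyleB io kp.1) kp.2))
      = pvRender pieces (xor io (decide (n % 2 = 1))) := by
  induction pieces with
  | nil => intro io n; simp [PySem.List.enumerate, pvRender]
  | cons p ps ih =>
    intro io n
    rw [PySem.List.enumerate_cons]
    have hpar : (decide ((n + 1) % 2 = 1)) = !(decide (n % 2 = 1)) := by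
      by_cases h : n % 2 = 1
      · have : (n + 1) % 2 = 0 := by omega
        simp [h, this]
      · have : (n + 1) % 2 = 1 := by omega
        simp [h, this]
    have hstyle : pvStyleB io n = (if xor io (decide (n % 2 = 1)) then "italic" else "regular") := by
      cases io <;> by_cases h : n % 2 = 1 <;> simp [pvStyleB, h]
    rw [List.filterMap_cons]
    by_cases h2 : p = []
    · simp only [h2, ih io (n + 1), hpar, pvRender]
      simp
    · simp only [if_neg h2, ih io (n + 1), hpar, hstyle, pvRender]
      simp

-- ===== VERDICT (by name: the statement is the Claim_ definition above) =====
theorem parse_italic_only_py_spec : Claim_equal_parse_italic_only_py := by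
  intro text italic_open _
  unfold Spec_parse_italic_only_py parse_italic_only_py parse_italic_only_py_alt
  by_cases h : text.toList.head? = some '_' ∧ text.toList.getLast? = some '_' ∧ 2 < text.toList.length
  · rw [if_pos h, if_pos h]
  · rw [if_neg h, if_neg h, pvALoop_eq_render, pvFilterMap_eq_render]
    norm_num
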